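-- pv_equiv track=rewrite | github.com/skelkar001/wealth-forecaster | app.py | calculate_retirement_withdrawal_strategy
-- ===== SOURCE A (Python) =====
-- def calculate_retirement_withdrawal_strategy(accounts_data, retirement_age):
--     """Calculate optimal withdrawal strategy"""
--
--     strategy = {
--         'withdrawal_order': []
--     }
--
--     # Optimal withdrawal sequence
--     if any(acc['type'] == 'Roth IRA' for acc in accounts_data):
--         strategy['withdrawal_order'].append("1. Roth IRA contributions (tax-free, no penalties)")
--
--     if any(acc['type'] == 'Taxable Investment' for acc in accounts_data):
--         strategy['withdrawal_order'].append("2. Taxable investment accounts (capital gains rates)")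
--
--     if any('Traditional' in acc['type'] for acc in accounts_data):
--         strategy['withdrawal_order'].append("3. Traditional IRA/401k (ordinary income tax)")
--
--     if any(acc['type'] == 'Roth IRA' for acc in accounts_data):
--         strategy['withdrawal_order'].append("4. Roth IRA earnings (last resort)")
--
--     return strategy
-- ===== SOURCE B (Python) =====
-- def calculate_retirement_withdrawal_strategy(accounts_data, retirement_age):
--     """Calculate optimal withdrawal strategy (single pass over accounts)"""
--     has_roth = has_taxable = has_trad = False
--     for acc in accounts_data:
--         if has_roth and has_taxable and has_trad:
--             break
--         t = acc['type']
--         has_roth = has_roth or t == 'Roth IRA'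
--         has_taxable = has_taxable or t == 'Taxable Investment'
--         has_trad = has_trad or 'Traditional' in t
--     order = []
--     if has_roth:
--         order.append("1. Roth IRA contributions (tax-free, no penalties)")
--     if has_taxable:
--         order.append("2. Taxable investment accounts (capital gains rates)")
--     if has_trad:
--         order.append("3. Traditional IRA/401k (ordinary income tax)")
--     if has_roth:
--         order.append("4. Roth IRA earnings (last resort)")
--     return {'withdrawal_order': order}
-- ===== Notes on version B (the rewrite author's own statement) =====
-- stated objective: alternative
-- what changed: B replaces A's four separate short-circuiting any() scans with a single pass that accumulates three boolean flags and breaks as soon as all three are set (preserving the exception behaviour on accounts missing 'type'), then assembles the order list from the flags.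
import Mathlib
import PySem

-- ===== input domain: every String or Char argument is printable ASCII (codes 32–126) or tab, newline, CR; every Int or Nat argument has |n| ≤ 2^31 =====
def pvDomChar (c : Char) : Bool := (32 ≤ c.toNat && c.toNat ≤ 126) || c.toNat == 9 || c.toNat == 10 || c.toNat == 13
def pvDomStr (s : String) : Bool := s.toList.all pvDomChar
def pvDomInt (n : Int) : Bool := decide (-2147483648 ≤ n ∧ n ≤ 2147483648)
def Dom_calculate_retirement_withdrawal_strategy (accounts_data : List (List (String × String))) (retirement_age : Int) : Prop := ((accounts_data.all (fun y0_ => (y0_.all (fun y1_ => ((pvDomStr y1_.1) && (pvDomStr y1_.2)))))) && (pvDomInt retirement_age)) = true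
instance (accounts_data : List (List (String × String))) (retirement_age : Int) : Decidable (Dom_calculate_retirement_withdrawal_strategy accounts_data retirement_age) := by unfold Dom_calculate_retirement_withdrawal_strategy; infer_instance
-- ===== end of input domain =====

-- B replaces A's four separate short-circuiting any() scans with one flag-accumulating
-- pass that breaks once all three flags are set; same exception behaviour (objective: alternative).

-- shared helpers: acc['type'] is a first-match association-list lookup; under
-- Pre_ (which excludes the KeyError inputs) the default "" is never observable,
-- because a missing-'type' account is only reached after all three tests hold.
def pvTy (acc : List (String × String)) : String := (List.lookup "type" acc).getD ""
def pvIsRoth (acc : List (String × String)) : Bool := pvTy acc == "Roth IRA"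
def pvIsTax (acc : List (String × String)) : Bool := pvTy acc == "Taxable Investment"
def pvIsTrad (acc : List (String × String)) : Bool := PySem.Str.isIn "Traditional" (pvTy acc)

-- ===== PORT A =====
def calculate_retirement_withdrawal_strategy (accounts_data : List (List (String × String))) (retirement_age : Int) : List (String × List String) :=
  let wo : List String := []
  let wo := if accounts_data.any pvIsRoth then wo ++ ["1. Roth IRA contributions (tax-free, no penalties)"] else wo
  let wo := if accounts_data.any pvIsTax then wo ++ ["2. Taxable investment accounts (capital gains rates)"] else wo
  let wo := if accounts_data.any pvIsTrad then wo ++ ["3. Traditional IRA/401k (ordinary income tax)"] else wo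
  let wo := if accounts_data.any pvIsRoth then wo ++ ["4. Roth IRA earnings (last resort)"] else wo
  [("withdrawal_order", wo)]

-- ===== PORT B =====
-- the single flag-accumulating loop of Source B, with its early break
def pvScan : List (List (String × String)) → Bool → Bool → Bool → Bool × Bool × Bool
  | [], r, t, tr => (r, t, tr)
  | acc :: rest, r, t, tr =>
    if r && t && tr then (r, t, tr)
    else pvScan rest (r || pvIsRoth acc) (t || pvIsTax acc) (tr || pvIsTrad acc)

def calculate_retirement_withdrawal_strategy_alt (accounts_data : List (List (String × String))) (retirement_age : Int) : List (String × List String) :=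
  let f := pvScan accounts_data false false false
  let order : List String := []
  let order := if f.1 then order ++ ["1. Roth IRA contributions (tax-free, no penalties)"] else order
  let order := if f.2.1 then order ++ ["2. Taxable investment accounts (capital gains rates)"] else order
  let order := if f.2.2 then order ++ ["3. Traditional IRA/401k (ordinary income tax)"] else order
  let order := if f.1 then order ++ ["4. Roth IRA earnings (last resort)"] else order
  [("withdrawal_order", order)]

-- ===== PRECONDITION & SPEC =====
-- Pre_ excludes exactly the inputs on which Python A raises KeyError: an account
-- without a 'type' key that is reached by one of the short-circuiting any() scans,
-- i.e. one that is not strictly preceded by a Roth, a Taxable and a Traditional match.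
def Pre_calculate_retirement_withdrawal_strategy (accounts_data : List (List (String × String))) (retirement_age : Int) : Prop :=
  ∀ i, (h : i < accounts_data.length) → List.lookup "type" accounts_data[i] = none →
    ((accounts_data.take i).any pvIsRoth = true ∧
     (accounts_data.take i).any pvIsTax = true ∧
     (accounts_data.take i).any pvIsTrad = true)
instance (accounts_data : List (List (String × String))) (retirement_age : Int) : Decidable (Pre_calculate_retirement_withdrawal_strategy accounts_data retirement_age) := by unfold Pre_calculate_retirement_withdrawal_strategy; infer_instance

def pvWitness_calculate_retirement_withdrawal_strategy : (List (List (String × String))) × Int := ([[("type", "Roth IRA")], [("type", "Traditional 401k")]], 65)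

def Spec_calculate_retirement_withdrawal_strategy (accounts_data : List (List (String × String))) (retirement_age : Int) (out : List (String × List String)) : Prop := out = calculate_retirement_withdrawal_strategy_alt accounts_data retirement_age
instance (accounts_data : List (List (String × String))) (retirement_age : Int) (out : List (String × List String)) : Decidable (Spec_calculate_retirement_withdrawal_strategy accounts_data retirement_age out) := by unfold Spec_calculate_retirement_withdrawal_strategy; infer_instance

-- ===== CLAIM (what is proved, stated in full; the proofs are below) =====
def Claim_equal_calculate_retirement_withdrawal_strategy : Prop := ∀ (accounts_data : List (List (String × String))) (retirement_age : Int), Dom_calculate_retirement_withdrawal_strategy accounts_data retirement_age → Pre_calculate_retirement_withdrawal_strategy accounts_data retirement_age → Spec_calculate_retirement_withdrawal_strategy accounts_data retirement_age (calculate_retirement_withdrawal_strategy accounts_data retirement_age)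

-- ===== LEMMAS AND PROOFS =====
-- the early-break scan computes exactly the three any-scans (flags are monotone)
theorem pvScan_eq (l : List (List (String × String))) (r t tr : Bool) :
    pvScan l r t tr = (r || l.any pvIsRoth, t || l.any pvIsTax, tr || l.any pvIsTrad) := by
  induction l generalizing r t tr with
  | nil => simp [pvScan]
  | cons a l ih =>
    simp only [pvScan, List.any_cons]
    split
    · next h =>
      simp only [Bool.and_eq_true] at h
      obtain ⟨⟨hr, ht⟩, htr⟩ := h
      subst hr; subst ht; subst htr
      simp
    · rw [ih]
      simp [Bool.or_assoc]

-- ===== VERDICT (by name: the statement is the Claim_ definition above) =====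
theorem calculate_retirement_withdrawal_strategy_spec : Claim_equal_calculate_retirement_withdrawal_strategy := by
  intro accounts_data retirement_age _ _
  unfold Spec_calculate_retirement_withdrawal_strategy
  unfold calculate_retirement_withdrawal_strategy calculate_retirement_withdrawal_strategy_alt
  rw [pvScan_eq]
  simp
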